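-- pv_equiv track=rewrite | github.com/ejmockler/clou | clou/telemetry.py | compute_reference_density
-- ===== SOURCE A (Python) =====
-- def compute_reference_density(
--     read_set: list[str],
--     output_text: str,
-- ) -> dict[str, bool]:
--     """Check which read set files are referenced in output text.
--
--     Uses simple substring matching: for each file in read_set,
--     check if the filename (without path) appears in output_text.
--     Returns ``{filename: referenced_bool}``.
--     """
--     import os
--
--     if not read_set or not output_text:
--         return {f: False for f in read_set} if read_set else {}
--     result: dict[str, bool] = {}
--     for filepath in read_set:
--         basename = os.path.basename(filepath)
--         result[filepath] = basename in output_text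
--     return result
-- ===== SOURCE B (Python) =====
-- def compute_reference_density(
--     read_set: list[str],
--     output_text: str,
-- ) -> dict[str, bool]:
--     """Check which read set files are referenced in output text.
--
--     Two-phase: first compute each DISTINCT basename's match once (memo),
--     then map every filepath through the memo.
--     """
--     if not output_text:
--         return {f: False for f in read_set}
--     memo: dict[str, bool] = {}
--     for filepath in read_set:
--         b = filepath.rpartition('/')[2]
--         if b not in memo:
--             memo[b] = b in output_text
--     return {f: memo[f.rpartition('/')[2]] for f in read_set}
-- ===== Notes on version B (the rewrite author's own statement) =====
-- stated objective: alternative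
-- what changed: B replaces A's per-filepath substring test with a two-phase scheme: one pass builds a memo dict mapping each distinct basename to its single substring check, a second pass maps every filepath through the memo, so duplicate basenames are searched once; the empty-text early return covers all cases without A's read_set branch.
import Mathlib
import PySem

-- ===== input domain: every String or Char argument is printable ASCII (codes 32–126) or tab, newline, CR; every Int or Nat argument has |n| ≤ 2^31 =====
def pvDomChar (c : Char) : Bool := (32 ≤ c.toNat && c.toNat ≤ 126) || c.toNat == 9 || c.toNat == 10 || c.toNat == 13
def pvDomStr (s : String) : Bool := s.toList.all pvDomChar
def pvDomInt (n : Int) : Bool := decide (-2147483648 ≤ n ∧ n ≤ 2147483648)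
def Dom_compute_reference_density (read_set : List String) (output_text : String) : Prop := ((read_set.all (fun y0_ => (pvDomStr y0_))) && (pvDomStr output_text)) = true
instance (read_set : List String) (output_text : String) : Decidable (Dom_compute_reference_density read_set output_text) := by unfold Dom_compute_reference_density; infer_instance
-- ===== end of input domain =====

-- B builds a memo dict of each distinct basename's single substring check and maps the
-- read set through it, instead of A's per-filepath substring test (objective: alternative).

-- port of os.path.basename (POSIX): p[p.rfind('/') + 1 :]  (exact on ASCII '/'-separated paths)
def pyBasename (s : String) : String :=
  String.ofList (PySem.Chars.slice s.toList (some (PySem.Chars.rfind s.toList ['/'] + 1)) none)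

-- ===== PORT A =====
def compute_reference_density (read_set : List String) (output_text : String) : List (String × Bool) :=
  if read_set = [] ∨ output_text = "" then
    (if read_set ≠ [] then
      (read_set.foldl (fun d f => d.insert f false) (PySem.Dict.empty : PySem.Dict String Bool)).items
     else [])
  else
    (read_set.foldl (fun d f =>
        let basename := pyBasename f
        d.insert f (PySem.Str.isIn basename output_text))
      (PySem.Dict.empty : PySem.Dict String Bool)).items

-- ===== PORT B =====
def compute_reference_density_alt (read_set : List String) (output_text : String) : List (String × Bool) :=
  if output_text = "" then
    (read_set.foldl (fun d f => d.insert f false) (PySem.Dict.empty : PySem.Dict String Bool)).items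
  else
    let memo := read_set.foldl (fun m f =>
        let b := pyBasename f
        if m.contains b then m else m.insert b (PySem.Str.isIn b output_text))
      (PySem.Dict.empty : PySem.Dict String Bool)
    (read_set.foldl (fun d f => d.insert f (memo.getD (pyBasename f) false))
      (PySem.Dict.empty : PySem.Dict String Bool)).items

-- ===== PRECONDITION & SPEC =====
def Spec_compute_reference_density (read_set : List String) (output_text : String) (out : List (String × Bool)) : Prop := out = compute_reference_density_alt read_set output_text
instance (read_set : List String) (output_text : String) (out : List (String × Bool)) : Decidable (Spec_compute_reference_density read_set output_text out) := by unfold Spec_compute_reference_density; infer_instance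

-- ===== CLAIM (what is proved, stated in full; the proofs are below) =====
def Claim_equal_compute_reference_density : Prop := ∀ (read_set : List String) (output_text : String), Dom_compute_reference_density read_set output_text → Spec_compute_reference_density read_set output_text (compute_reference_density read_set output_text)

-- ===== LEMMAS AND PROOFS =====

-- the memo-building step of B, abstracted over the check function
def memoStep (check : String → Bool) (m : PySem.Dict String Bool) (f : String) : PySem.Dict String Bool :=
  if m.contains (pyBasename f) then m else m.insert (pyBasename f) (check (pyBasename f))

-- one memo step never removes a key
lemma memoStep_contains_mono (check : String → Bool) (m : PySem.Dict String Bool) (f k : String)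
    (h : m.contains k = true) : (memoStep check m f).contains k = true := by
  unfold memoStep
  split
  · exact h
  · simp [PySem.Dict.contains_insert, h]


lemma memo_contains_mono (check : String → Bool) (l : List String)
    (m : PySem.Dict String Bool) (k : String) (h : m.contains k = true) :
    (l.foldl (memoStep check) m).contains k = true := by
  induction l generalizing m with
  | nil => exact h
  | cons f rest ih => exact ih _ (memoStep_contains_mono check m f k h)

-- after the memo fold, the basename of every processed filepath is a key
lemma memo_contains_of_mem (check : String → Bool) (l : List String)
    (m : PySem.Dict String Bool) (f : String) (hf : f ∈ l) :
    (l.foldl (memoStep check) m).contains (pyBasename f) = true := by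
  induction l generalizing m with
  | nil => cases hf
  | cons f0 rest ih =>
    rw [List.foldl_cons]
    rcases List.mem_cons.mp hf with hf | hf
    · subst hf
      apply memo_contains_mono
      unfold memoStep
      split
      · assumption
      · exact PySem.Dict.contains_insert_self _ _ _
    · exact ih _ hf

-- invariant: every key stored in the memo stores its check value
def MemoInv (check : String → Bool) (m : PySem.Dict String Bool) : Prop :=
  ∀ k, m.contains k = true → m.getD k false = check k

lemma memoStep_inv (check : String → Bool) (m : PySem.Dict String Bool) (f : String)
    (h : MemoInv check m) : MemoInv check (memoStep check m f) := by
  unfold memoStep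
  split
  · exact h
  · intro k hk
    rw [PySem.Dict.getD_insert]
    split
    · next heq => subst heq; rfl
    · next hne =>
      apply h
      rw [PySem.Dict.contains_insert] at hk
      simpa [hne] using hk

lemma memo_inv (check : String → Bool) (l : List String) (m : PySem.Dict String Bool)
    (h : MemoInv check m) : MemoInv check (l.foldl (memoStep check) m) := by
  induction l generalizing m with
  | nil => exact h
  | cons f rest ih => exact ih _ (memoStep_inv check m f h)

-- the memo lookup B performs equals the direct check A performs
lemma memo_getD (check : String → Bool) (l : List String) (f : String) (hf : f ∈ l) :
    (l.foldl (memoStep check) PySem.Dict.empty).getD (pyBasename f) false = check (pyBasename f) := by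
  have hinv : MemoInv check (l.foldl (memoStep check) PySem.Dict.empty) := by
    apply memo_inv
    intro k hk
    simp [PySem.Dict.contains_empty] at hk
  exact hinv _ (memo_contains_of_mem check l PySem.Dict.empty f hf)

-- ===== VERDICT (by name: the statement is the Claim_ definition above) =====
theorem compute_reference_density_spec : Claim_equal_compute_reference_density := by
  intro read_set output_text _
  unfold Spec_compute_reference_density compute_reference_density compute_reference_density_alt
  by_cases ht : output_text = ""
  · rw [if_pos (Or.inr ht), if_pos ht]
    by_cases hr : read_set = []
    · subst hr; rfl
    · rw [if_pos hr]
  · rw [if_neg ht]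
    by_cases hr : read_set = []
    · subst hr; rw [if_pos (Or.inl rfl)]; rfl
    · rw [if_neg (not_or.mpr ⟨hr, ht⟩)]
      exact congrArg PySem.Dict.items
        (PySem.List.foldl_congr_mem read_set _ _ _
          (fun acc f hf => (congrArg (acc.insert f)
            (memo_getD (fun b => PySem.Str.isIn b output_text) read_set f hf)).symm))
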